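-- pv_equiv track=rewrite | github.com/anderson-dan-w/headlinepuzz | headlinepuzz/hat.py | numerizeWord
-- ===== SOURCE A (Python) =====
-- import collections
--
-- def numerizeWord(word):
--     numeric = [None] * len(word) ## tuple-ize after assignments
--     offset = 1
--     for letter, counts in sorted(collections.Counter(word).items()):
--         occurrence = -1
--         for count in range(counts):
--             occurrence = word.find(letter, occurrence + 1)
--             numeric[occurrence] = offset
--             offset += 1
--     return tuple(numeric)
-- ===== SOURCE B (Python) =====
-- def numerizeWord(word):
--     order = sorted(range(len(word)), key=lambda i: (word[i], i))
--     numeric = [0] * len(word)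
--     for rank, i in enumerate(order, 1):
--         numeric[i] = rank
--     return tuple(numeric)
-- ===== Notes on version B (the rewrite author's own statement) =====
-- stated objective: alternative
-- what changed: Instead of counting letters and re-scanning the string with repeated str.find for each occurrence, B sorts the positions once by the key (letter, position) and assigns ranks 1..n along that sorted order in a single pass.
import Mathlib
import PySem

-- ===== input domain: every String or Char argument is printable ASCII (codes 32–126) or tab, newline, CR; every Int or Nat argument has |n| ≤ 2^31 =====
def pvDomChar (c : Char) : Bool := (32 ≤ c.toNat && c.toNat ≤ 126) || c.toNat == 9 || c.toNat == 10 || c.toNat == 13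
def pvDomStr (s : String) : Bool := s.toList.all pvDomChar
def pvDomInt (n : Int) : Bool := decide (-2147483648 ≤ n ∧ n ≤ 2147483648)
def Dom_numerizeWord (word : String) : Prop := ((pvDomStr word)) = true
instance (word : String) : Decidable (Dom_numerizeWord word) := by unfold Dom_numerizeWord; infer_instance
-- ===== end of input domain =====

-- B replaces A's Counter plus per-letter rescanning with repeated str.find by one sort of the
-- positions keyed by (letter, position) followed by a single rank-assignment pass (alternative
-- algorithm; not measured faster).

-- ===== PORT A =====
-- `numeric` is Python's `[None] * len(word)` typed List (Option Int); every slot is assigned by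
-- the loop, so the final `.getD 0` only removes the Option wrapper from assigned slots.
-- `pySetD` is exact here: `occurrence` is always an in-range index (the letter does occur).
def numerizeWord (word : String) : List Int :=
  let cs := word.toList
  let numeric : List (Option Int) := List.replicate cs.length none
  let st :=
    (PySem.List.sorted2 (PySem.Dict.counter cs).items (fun p => p.1) (fun p => p.2)).foldl
      (fun (st : List (Option Int) × Int) lc =>
        let inner :=
          (PySem.List.pyRange 0 lc.2 1).foldl
            (fun (s : List (Option Int) × Int × Int) _ =>
              let occurrence := PySem.Chars.findFrom cs [lc.1] (s.2.2 + 1) none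
              (PySem.List.pySetD s.1 occurrence (some s.2.1), s.2.1 + 1, occurrence))
            (st.1, st.2, -1)
        (inner.1, inner.2.1))
      (numeric, 1)
  st.1.map (fun o => o.getD 0)

-- ===== PORT B =====
-- `pyGetD cs i ' '` is word[i]: i is always an in-range index (it comes from range(len(word))).
def numerizeWord_alt (word : String) : List Int :=
  let cs := word.toList
  let order := PySem.List.sorted2 (PySem.List.pyRange 0 (cs.length : Int) 1)
      (fun i => PySem.List.pyGetD cs i ' ') (fun i => i)
  let numeric : List Int := List.replicate cs.length 0
  (order.zipIdx).foldl (fun acc p => PySem.List.pySetD acc p.1 ((p.2 : Int) + 1)) numeric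

-- ===== PRECONDITION & SPEC =====
def Spec_numerizeWord (word : String) (out : List Int) : Prop := out = numerizeWord_alt word
instance (word : String) (out : List Int) : Decidable (Spec_numerizeWord word out) := by unfold Spec_numerizeWord; infer_instance

-- ===== CLAIM (what is proved, stated in full; the proofs are below) =====
def Claim_equal_numerizeWord : Prop := ∀ (word : String), Dom_numerizeWord word → Spec_numerizeWord word (numerizeWord word)

-- ===== LEMMAS AND PROOFS =====

-- positions (ascending) at which letter c occurs in cs
def pvPosns (cs : List Char) (c : Char) : List Nat :=
  (List.range cs.length).filter (fun j => cs.getD j ' ' == c)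

-- the distinct letters of cs in sorted order
def pvLets (cs : List Char) : List Char :=
  PySem.List.sorted (PySem.Set.ofList cs) (fun x => x)

-- the index sequence both programs assign ranks along
def pvOccList (cs : List Char) : List Int :=
  (pvLets cs).flatMap (fun c => (pvPosns cs c).map (fun (j : Nat) => (j : Int)))

-- the common rank-assignment step/fold (on A's Option-valued array)
def pvAssign (st : List (Option Int) × Int) (i : Int) : List (Option Int) × Int :=
  (PySem.List.pySetD st.1 i (some st.2), st.2 + 1)

def pvAssignFold (is : List Int) (st : List (Option Int) × Int) : List (Option Int) × Int :=
  is.foldl pvAssign st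

-- A's inner-loop step for letter c
def pvStep (cs : List Char) (c : Char) (s : List (Option Int) × Int × Int) :
    List (Option Int) × Int × Int :=
  let occurrence := PySem.Chars.findFrom cs [c] (s.2.2 + 1) none
  (PySem.List.pySetD s.1 occurrence (some s.2.1), s.2.1 + 1, occurrence)

lemma pvFoldl_const_iterate {α β : Type} (g : α → α) (l : List β) (init : α) :
    l.foldl (fun s _ => g s) init = g^[l.length] init := by
  induction l generalizing init with
  | nil => rfl
  | cons a t ih => simp [List.foldl_cons, ih, Function.iterate_succ_apply]

lemma pvSorted2_eq_sorted_lex {α κ₁ κ₂ : Type} [LinearOrder κ₁] [LinearOrder κ₂]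
    (xs : List α) (k1 : α → κ₁) (k2 : α → κ₂) :
    PySem.List.sorted2 xs k1 k2 = PySem.List.sorted xs (fun a => toLex (k1 a, k2 a)) := by
  have h2 : PySem.List.sorted2 xs k1 k2
      = xs.foldl (fun acc x => PySem.List.insertBy
          (fun a b => decide (k1 a < k1 b) || (!decide (k1 b < k1 a) && decide (k2 a < k2 b)))
          x acc) [] := rfl
  have h3 : (fun (a b : α) => decide (k1 a < k1 b) || (!decide (k1 b < k1 a) && decide (k2 a < k2 b)))
      = (fun a b => decide ((fun a => toLex (k1 a, k2 a)) a < (fun a => toLex (k1 a, k2 a)) b)) := by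
    funext a b
    rcases lt_trichotomy (k1 a) (k1 b) with h | h | h
    · simp [Prod.Lex.toLex_lt_toLex, h]
    · simp [Prod.Lex.toLex_lt_toLex, h]
    · simp [Prod.Lex.toLex_lt_toLex, not_lt_of_gt h, h.ne', h]
  rw [h2, PySem.List.sorted_eq_foldl_insertBy, h3]

lemma pvPosns_pairwise (cs : List Char) (c : Char) : (pvPosns cs c).Pairwise (· < ·) :=
  List.pairwise_lt_range.filter _

lemma pvMem_posns (cs : List Char) (c : Char) (j : Nat) :
    j ∈ pvPosns cs c ↔ j < cs.length ∧ cs.getD j ' ' = c := by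
  simp [pvPosns, List.mem_filter, List.mem_range]

lemma pvPosns_length (cs : List Char) (c : Char) : (pvPosns cs c).length = cs.count c := by
  have hmap : (List.range cs.length).map (fun j => cs.getD j ' ') = cs := by
    apply List.ext_getElem
    · simp
    · intro i h1 h2
      simp only [List.getElem_map, List.getElem_range]
      exact List.getD_eq_getElem cs ' ' (by simpa using h2)
  show ((List.range cs.length).filter (fun j => cs.getD j ' ' == c)).length = cs.count c
  rw [← List.countP_eq_length_filter]
  calc List.countP (fun j => cs.getD j ' ' == c) (List.range cs.length)
      = List.countP ((fun x => x == c) ∘ (fun j => cs.getD j ' ')) (List.range cs.length) := rfl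
    _ = List.countP (fun x => x == c) ((List.range cs.length).map (fun j => cs.getD j ' ')) :=
        List.countP_map.symm
    _ = List.countP (fun x => x == c) cs := by rw [hmap]
    _ = cs.count c := List.count_eq_countP.symm

lemma pvPrefix_singleton' (l : List Char) (c : Char) : [c] <+: l ↔ l.head? = some c := by
  cases l <;> simp [List.cons_prefix_iff, eq_comm]

lemma pvPrefix_singleton (cs : List Char) (c : Char) (i : Nat) :
    [c] <+: cs.drop i ↔ i < cs.length ∧ cs.getD i ' ' = c := by
  rw [pvPrefix_singleton', List.head?_drop, List.getElem?_eq_some_iff]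
  constructor
  · rintro ⟨h, hc⟩; exact ⟨h, by rw [List.getD_eq_getElem cs ' ' h]; exact hc⟩
  · rintro ⟨h, hc⟩; exact ⟨h, by rw [← List.getD_eq_getElem cs ' ' h]; exact hc⟩

-- findFrom with a one-char needle returns the head of the remaining occurrence list
lemma pvFindFrom_eq_head (cs : List Char) (c : Char) (k : Nat) (hk : k ≤ cs.length)
    (os : List Nat) (hos : (pvPosns cs c).filter (fun j => k ≤ j) = os) :
    PySem.Chars.findFrom cs [c] (k : Int) none =
      (match os with | [] => (-1 : Int) | j :: _ => (j : Int)) := by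
  rw [PySem.Chars.findFrom_natCast cs [c] k hk]
  cases os with
  | nil =>
    have hno : ∀ a ∈ pvPosns cs c, ¬ (k ≤ a) := by
      intro a ha hk'
      have := List.filter_eq_nil_iff.mp hos a ha
      simp [hk'] at this
    have hfind : PySem.Chars.find (cs.drop k) [c] = -1 := by
      rw [PySem.Chars.find_eq_neg_one_iff]
      intro hinf
      have hin : PySem.Chars.isIn [c] (cs.drop k) = true :=
        (PySem.Chars.isIn_iff_infix _ _).mpr hinf
      obtain ⟨j, hj⟩ := (PySem.Chars.exists_prefix_drop_iff_isIn _ _).mpr hin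
      rw [List.drop_drop, pvPrefix_singleton] at hj
      exact hno (k + j) ((pvMem_posns _ _ _).mpr hj) (by omega)
    simp [hfind]
  | cons j rest =>
    have hjmem : j ∈ (pvPosns cs c).filter (fun j => k ≤ j) := by rw [hos]; simp
    rw [List.mem_filter] at hjmem
    obtain ⟨hjp, hjk'⟩ := hjmem
    have hjk : k ≤ j := by simpa using hjk'
    rw [pvMem_posns] at hjp
    have hpre : [c] <+: (cs.drop k).drop (j - k) := by
      rw [List.drop_drop, pvPrefix_singleton, Nat.add_sub_cancel' hjk]
      exact hjp
    have hnn : 0 ≤ PySem.Chars.find (cs.drop k) [c] := by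
      rw [PySem.Chars.find_nonneg_iff, ← PySem.Chars.isIn_iff_infix,
        ← PySem.Chars.exists_prefix_drop_iff_isIn]
      exact ⟨j - k, hpre⟩
    rw [if_neg (by omega)]
    obtain ⟨hp, hmin⟩ := PySem.Chars.find_spec hnn
    have h1 : (PySem.Chars.find (cs.drop k) [c]).toNat ≤ j - k := by
      by_contra hlt
      exact hmin (j - k) (by omega) hpre
    rw [List.drop_drop, pvPrefix_singleton] at hp
    have hmem2 : (k + (PySem.Chars.find (cs.drop k) [c]).toNat)
        ∈ (pvPosns cs c).filter (fun j => k ≤ j) := by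
      rw [List.mem_filter]
      exact ⟨(pvMem_posns _ _ _).mpr hp, by simp⟩
    rw [hos] at hmem2
    have hpw : (j :: rest).Pairwise (· < ·) := hos ▸ (pvPosns_pairwise cs c).filter _
    have hge : j ≤ k + (PySem.Chars.find (cs.drop k) [c]).toNat := by
      rcases List.mem_cons.mp hmem2 with h | h
      · omega
      · have := (List.pairwise_cons.mp hpw).1 _ h; omega
    have hf : ((PySem.Chars.find (cs.drop k) [c]).toNat : Int)
        = PySem.Chars.find (cs.drop k) [c] := Int.toNat_of_nonneg hnn
    show (k : Int) + PySem.Chars.find (cs.drop k) [c] = (j : Int)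
    omega

lemma pvInner_loop (cs : List Char) (c : Char) (os : List Nat) : ∀ (prev : Int)
    (numeric : List (Option Int)) (offset : Int),
    -1 ≤ prev → prev + 1 ≤ (cs.length : Int) →
    (pvPosns cs c).filter (fun (j : Nat) => decide (prev < (j : Int))) = os →
    (pvStep cs c)^[os.length] (numeric, offset, prev)
      = ((pvAssignFold (os.map (fun (j : Nat) => (j : Int))) (numeric, offset)).1,
         (pvAssignFold (os.map (fun (j : Nat) => (j : Int))) (numeric, offset)).2,
         (os.map (fun (j : Nat) => (j : Int))).getLastD prev) := by
  induction os with
  | nil => intro prev numeric offset h1 h2 hos; simp [pvAssignFold]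
  | cons j rest ih =>
    intro prev numeric offset h1 h2 hos
    have hk0 : (0 : Int) ≤ prev + 1 := by omega
    have hkeq : ((prev + 1).toNat : Int) = prev + 1 := Int.toNat_of_nonneg hk0
    have hkle : (prev + 1).toNat ≤ cs.length := by omega
    have hos' : (pvPosns cs c).filter (fun (x : Nat) => (prev + 1).toNat ≤ x) = j :: rest := by
      rw [← hos]
      apply List.filter_congr
      intro x hx
      simp only [decide_eq_decide]
      omega
    have hfind : PySem.Chars.findFrom cs [c] (prev + 1) none = (j : Int) := by
      have h := pvFindFrom_eq_head cs c (prev + 1).toNat hkle (j :: rest) hos'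
      rw [hkeq] at h
      exact h
    have hjmemf : j ∈ (pvPosns cs c).filter (fun (x : Nat) => decide (prev < (x : Int))) := by
      rw [hos]; simp
    have hjmem : j ∈ pvPosns cs c := (List.mem_filter.mp hjmemf).1
    have hpj : prev < (j : Int) := by simpa using (List.mem_filter.mp hjmemf).2
    have hjlt : j < cs.length := ((pvMem_posns _ _ _).mp hjmem).1
    have hpw : (j :: rest).Pairwise (· < ·) := hos ▸ (pvPosns_pairwise cs c).filter _
    have hrest : (pvPosns cs c).filter (fun (x : Nat) => decide ((j : Int) < (x : Int))) = rest := by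
      have hcomb : (pvPosns cs c).filter (fun (x : Nat) => decide ((j : Int) < (x : Int)))
          = ((pvPosns cs c).filter (fun (x : Nat) => decide (prev < (x : Int)))).filter
              (fun (x : Nat) => decide ((j : Int) < (x : Int))) := by
        rw [List.filter_filter]
        apply List.filter_congr
        intro x hx
        by_cases hjx : (j : Int) < (x : Int)
        · simp [hjx, show prev < (x : Int) by omega]
        · simp [hjx]
      rw [hcomb, hos]
      simp only [List.filter_cons]
      rw [if_neg (by simp)]
      apply List.filter_eq_self.mpr
      intro x hx
      have hxlt := (List.pairwise_cons.mp hpw).1 x hx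
      simp only [decide_eq_true_eq]
      exact_mod_cast hxlt
    rw [List.length_cons, Function.iterate_succ_apply]
    have hstep : pvStep cs c (numeric, offset, prev)
        = (PySem.List.pySetD numeric (j : Int) (some offset), offset + 1, (j : Int)) := by
      simp [pvStep, hfind]
    rw [hstep]
    rw [ih (j : Int) (PySem.List.pySetD numeric (j : Int) (some offset)) (offset + 1)
          (by omega) (by exact_mod_cast (by omega : (j : Int) + 1 ≤ (cs.length : Int))) hrest]
    simp only [List.map_cons, List.getLastD_cons, pvAssignFold, List.foldl_cons, pvAssign]

lemma pvSorted_items (cs : List Char) :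
    PySem.List.sorted2 (PySem.Dict.counter cs).items (fun p => p.1) (fun p => p.2)
      = (pvLets cs).map (fun c => (c, (cs.count c : Int))) := by
  rw [pvSorted2_eq_sorted_lex]
  apply PySem.List.sorted_eq_of_perm_of_pairwise_lt
  · rw [PySem.Dict.items_counter]
    exact (PySem.List.sorted_perm _ _ _).map _
  · refine List.pairwise_map.mpr ?_
    have h := PySem.List.sorted_ofList_pairwise_lt cs
    exact h.imp (fun hab => Prod.Lex.toLex_lt_toLex.mpr (Or.inl hab))

lemma pvPairwise_flatMap {α β : Type} (R : β → β → Prop) (g : α → List β) (l : List α)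
    (h1 : ∀ a ∈ l, (g a).Pairwise R)
    (h2 : l.Pairwise (fun a b => ∀ x ∈ g a, ∀ y ∈ g b, R x y)) :
    (l.flatMap g).Pairwise R := by
  induction l with
  | nil => simp
  | cons a t ih =>
    rw [List.flatMap_cons, List.pairwise_append]
    obtain ⟨ha, ht⟩ := List.pairwise_cons.mp h2
    refine ⟨h1 a (by simp), ih (fun b hb => h1 b (by simp [hb])) ht, ?_⟩
    intro x hx y hy
    rw [List.mem_flatMap] at hy
    obtain ⟨b, hb, hyb⟩ := hy
    exact ha b hb x hx y hyb

lemma pvOccList_pairwise (cs : List Char) :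
    (pvOccList cs).Pairwise (fun a b =>
      (fun i => toLex (PySem.List.pyGetD cs i ' ', i)) a
        < (fun i => toLex (PySem.List.pyGetD cs i ' ', i)) b) := by
  apply pvPairwise_flatMap
  · intro c hc
    refine List.pairwise_map.mpr ?_
    refine List.Pairwise.imp_of_mem ?_ (pvPosns_pairwise cs c)
    intro a b ha hb hlt
    have hca := (pvMem_posns cs c a).mp ha
    have hcb := (pvMem_posns cs c b).mp hb
    simp only
    rw [PySem.List.pyGetD_natCast, PySem.List.pyGetD_natCast, hca.2, hcb.2]
    exact Prod.Lex.toLex_lt_toLex.mpr (Or.inr ⟨rfl, by show ((a : Nat) : Int) < ((b : Nat) : Int); exact_mod_cast hlt⟩)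
  · have hlt := PySem.List.sorted_ofList_pairwise_lt cs
    refine hlt.imp ?_
    intro c d hcd x hx y hy
    rw [List.mem_map] at hx hy
    obtain ⟨a, ha, rfl⟩ := hx
    obtain ⟨b, hb, rfl⟩ := hy
    simp only
    rw [PySem.List.pyGetD_natCast, PySem.List.pyGetD_natCast,
      ((pvMem_posns _ _ _).mp ha).2, ((pvMem_posns _ _ _).mp hb).2]
    exact Prod.Lex.toLex_lt_toLex.mpr (Or.inl hcd)

lemma pvOrder_eq (cs : List Char) :
    PySem.List.sorted2 (PySem.List.pyRange 0 (cs.length : Int) 1)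
      (fun i => PySem.List.pyGetD cs i ' ') (fun i => i) = pvOccList cs := by
  rw [pvSorted2_eq_sorted_lex, PySem.List.pyRange_zero_natCast]
  apply PySem.List.sorted_eq_of_perm_of_pairwise_lt
  · have hpw := pvOccList_pairwise cs
    have hnd1 : (pvOccList cs).Nodup := by
      refine hpw.imp ?_
      intro a b h heq
      subst heq
      exact lt_irrefl _ h
    have hnd2 : ((List.range cs.length).map (fun k : Nat => (k : Int))).Nodup :=
      List.nodup_range.map Nat.cast_injective
    rw [List.perm_ext_iff_of_nodup hnd1 hnd2]
    intro x
    simp only [pvOccList, List.mem_flatMap, List.mem_map, List.mem_range, pvLets,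
      PySem.List.mem_sorted, PySem.Set.mem_ofList]
    constructor
    · rintro ⟨c, hc, j, hj, rfl⟩
      exact ⟨j, ((pvMem_posns _ _ _).mp hj).1, rfl⟩
    · rintro ⟨j, hj, rfl⟩
      refine ⟨cs.getD j ' ', ?_, j, (pvMem_posns _ _ _).mpr ⟨hj, rfl⟩, rfl⟩
      rw [List.getD_eq_getElem cs ' ' hj]
      exact List.getElem_mem _
  · exact pvOccList_pairwise cs

lemma pvA_eq_assign (word : String) :
    numerizeWord word
      = (pvAssignFold (pvOccList word.toList)
          (List.replicate word.toList.length none, 1)).1.map (fun o => o.getD 0) := by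
  have hstep : ∀ (st : List (Option Int) × Int) (c : Char),
      (let inner :=
        (PySem.List.pyRange 0 ((word.toList.count c : Nat) : Int) 1).foldl
          (fun (s : List (Option Int) × Int × Int) (_ : Int) =>
            let occurrence := PySem.Chars.findFrom word.toList [c] (s.2.2 + 1) none
            (PySem.List.pySetD s.1 occurrence (some s.2.1), s.2.1 + 1, occurrence))
          (st.1, st.2, -1)
       (inner.1, inner.2.1))
        = pvAssignFold ((pvPosns word.toList c).map (fun (j : Nat) => (j : Int))) st := by
    intro st c
    simp only [PySem.List.pyRange_zero_natCast]
    rw [show (fun (s : List (Option Int) × Int × Int) (_ : Int) =>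
          let occurrence := PySem.Chars.findFrom word.toList [c] (s.2.2 + 1) none
          (PySem.List.pySetD s.1 occurrence (some s.2.1), s.2.1 + 1, occurrence))
        = (fun s _ => pvStep word.toList c s) from rfl]
    rw [pvFoldl_const_iterate (pvStep word.toList c)]
    rw [List.length_map, List.length_range, ← pvPosns_length]
    rw [pvInner_loop word.toList c (pvPosns word.toList c) (-1) st.1 st.2 (by omega)
        (by omega) (List.filter_eq_self.mpr (fun x hx => by simp only [decide_eq_true_eq]; omega))]
  have main : ∀ (ls : List Char) (st : List (Option Int) × Int),
      ls.foldl (fun (st : List (Option Int) × Int) (c : Char) =>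
          let inner :=
            (PySem.List.pyRange 0 ((word.toList.count c : Nat) : Int) 1).foldl
              (fun (s : List (Option Int) × Int × Int) (_ : Int) =>
                let occurrence := PySem.Chars.findFrom word.toList [c] (s.2.2 + 1) none
                (PySem.List.pySetD s.1 occurrence (some s.2.1), s.2.1 + 1, occurrence))
              (st.1, st.2, -1)
          (inner.1, inner.2.1)) st
        = pvAssignFold (ls.flatMap (fun c => (pvPosns word.toList c).map (fun (j : Nat) => (j : Int)))) st := by
    intro ls
    induction ls with
    | nil => intro st; rfl
    | cons a t ih =>
      intro st
      rw [List.foldl_cons]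
      simp only []
      rw [hstep st a, List.flatMap_cons]
      rw [show pvAssignFold ((pvPosns word.toList a).map (fun (j : Nat) => (j : Int)) ++
            t.flatMap (fun c => (pvPosns word.toList c).map (fun (j : Nat) => (j : Int)))) st
          = pvAssignFold (t.flatMap (fun c => (pvPosns word.toList c).map (fun (j : Nat) => (j : Int))))
              (pvAssignFold ((pvPosns word.toList a).map (fun (j : Nat) => (j : Int))) st) from by
        simp [pvAssignFold, List.foldl_append]]
      exact ih _
  simp only [numerizeWord]
  rw [pvSorted_items, List.foldl_map]
  rw [main (pvLets word.toList) (List.replicate word.toList.length none, 1)]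
  rfl

lemma pvAssign_map (is : List Int) : ∀ (k : Nat) (numeric : List (Option Int)),
    (∀ i ∈ is, 0 ≤ i) →
    (pvAssignFold is (numeric, (k : Int) + 1)).1.map (fun o => o.getD 0)
      = (is.zipIdx k).foldl (fun acc p => PySem.List.pySetD acc p.1 ((p.2 : Int) + 1))
          (numeric.map (fun o => o.getD 0)) := by
  induction is with
  | nil => intro k numeric h; rfl
  | cons a t ih =>
    intro k numeric h
    have ha : 0 ≤ a := h a (by simp)
    have hset : (PySem.List.pySetD numeric a (some ((k : Int) + 1))).map (fun o => o.getD 0)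
        = PySem.List.pySetD (numeric.map (fun o => o.getD 0)) a ((k : Int) + 1) := by
      rw [PySem.List.pySetD_of_nonneg _ _ ha, PySem.List.pySetD_of_nonneg _ _ ha, List.map_set]
      simp
    have hcast : (k : Int) + 1 + 1 = ((k + 1 : Nat) : Int) + 1 := by push_cast; ring
    have hlhs : pvAssignFold (a :: t) (numeric, (k : Int) + 1)
        = pvAssignFold t
            (PySem.List.pySetD numeric a (some ((k : Int) + 1)), ((k + 1 : Nat) : Int) + 1) := by
      simp only [pvAssignFold, List.foldl_cons, pvAssign]
      rw [hcast]
    rw [hlhs, ih (k + 1) _ (fun i hi => h i (by simp [hi])), hset,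
      List.zipIdx_cons, List.foldl_cons]

-- ===== VERDICT (by name: the statement is the Claim_ definition above) =====
theorem numerizeWord_spec : Claim_equal_numerizeWord := by
  intro word _
  show numerizeWord word = numerizeWord_alt word
  rw [pvA_eq_assign]
  have h0 : ∀ i ∈ pvOccList word.toList, 0 ≤ i := by
    intro i hi
    simp only [pvOccList, List.mem_flatMap, List.mem_map] at hi
    obtain ⟨c, hc, j, hj, hji⟩ := hi
    exact hji ▸ Int.natCast_nonneg j
  have hmain := pvAssign_map (pvOccList word.toList) 0 (List.replicate word.toList.length none) h0
  simp only [Nat.cast_zero, zero_add, List.map_replicate, Option.getD_none] at hmain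
  rw [hmain]
  simp only [numerizeWord_alt]
  rw [pvOrder_eq]
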